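-- pv_equiv track=rewrite | github.com/seungriyou/algorithm-study | Data-Structure/Hash-Table/PG-1845.py | solution
-- ===== SOURCE A (Python) =====
-- from collections import defaultdict
--
-- def solution(nums):
--         cnt = defaultdict(int)
--         for n in nums:
--             cnt[n] += 1
--
--         if len(cnt) <= len(nums) // 2:
--             return len(cnt)
--         else:
--             return len(nums) // 2
-- ===== SOURCE B (Python) =====
-- def solution(nums):
--     s = sorted(nums)
--     distinct = 0
--     for i in range(len(s)):
--         if i == 0 or s[i] != s[i - 1]:
--             distinct += 1
--     half = len(nums) // 2
--     return distinct if distinct <= half else half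
-- ===== Notes on version B (the rewrite author's own statement) =====
-- stated objective: alternative
-- what changed: Replaces the hash-table (defaultdict) count accumulation with sort-then-adjacent-scan: the distinct count is read off as the number of positions in the sorted copy whose element differs from its predecessor.
import Mathlib
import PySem

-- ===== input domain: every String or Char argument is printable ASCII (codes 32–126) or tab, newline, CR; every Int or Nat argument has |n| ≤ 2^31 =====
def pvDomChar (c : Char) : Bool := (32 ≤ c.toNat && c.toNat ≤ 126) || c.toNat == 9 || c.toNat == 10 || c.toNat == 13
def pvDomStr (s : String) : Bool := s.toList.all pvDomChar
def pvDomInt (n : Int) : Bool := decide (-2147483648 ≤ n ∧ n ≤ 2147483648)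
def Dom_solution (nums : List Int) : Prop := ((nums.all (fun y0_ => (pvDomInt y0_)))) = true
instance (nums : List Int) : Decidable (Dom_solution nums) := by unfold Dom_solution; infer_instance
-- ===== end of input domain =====

-- B replaces A's hash-table accumulation with sort-then-adjacent-scan (alternative decomposition, not claimed faster).

-- ===== PORT A =====
-- cnt = defaultdict(int); for n in nums: cnt[n] += 1
def solution (nums : List Int) : Int :=
  let cnt : PySem.Dict Int Int :=
    nums.foldl (fun d n => d.modify n 0 (· + 1)) PySem.Dict.empty
  if (cnt.size : Int) ≤ PySem.Int.floordiv (PySem.List.len nums) 2 then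
    (cnt.size : Int)
  else
    PySem.Int.floordiv (PySem.List.len nums) 2

-- ===== PORT B =====
-- s = sorted(nums); scan s counting positions where the element differs from its predecessor
def solution_alt (nums : List Int) : Int :=
  let s := PySem.List.sorted nums (fun x => x) false
  let st := s.foldl
    (fun (st : Int × Option Int) x =>
      (if st.2 = none ∨ some x ≠ st.2 then st.1 + 1 else st.1, some x))
    (0, none)
  let half := PySem.Int.floordiv (PySem.List.len nums) 2
  if st.1 ≤ half then st.1 else half

-- ===== PRECONDITION & SPEC =====
def Spec_solution (nums : List Int) (out : Int) : Prop := out = solution_alt nums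
instance (nums : List Int) (out : Int) : Decidable (Spec_solution nums out) := by unfold Spec_solution; infer_instance

-- ===== CLAIM (what is proved, stated in full; the proofs are below) =====
def Claim_equal_solution : Prop := ∀ (nums : List Int), Dom_solution nums → Spec_solution nums (solution nums)

-- ===== LEMMAS AND PROOFS =====

-- the tail of B's fold, with a fixed predecessor
def pvChange (p : Int) : List Int → Int
  | [] => 0
  | x :: xs => (if x ≠ p then 1 else 0) + pvChange x xs

lemma pvFold_some (t : List Int) (p d : Int) :
    (t.foldl (fun (st : Int × Option Int) x =>
      (if st.2 = none ∨ some x ≠ st.2 then st.1 + 1 else st.1, some x)) (d, some p))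
    = (d + pvChange p t, some (t.getLastD p)) := by
  induction t generalizing p d with
  | nil => simp [pvChange]
  | cons x xs ih =>
    simp only [List.foldl_cons, pvChange, List.getLastD_cons]
    rw [ih]
    by_cases hx : x = p
    · subst hx; simp
    · simp [hx]; ring

lemma pvChange_card (p : Int) (t : List Int) (h : (p :: t).Pairwise (· ≤ ·)) :
    pvChange p t + 1 = (((p :: t).toFinset.card : Int)) := by
  induction t generalizing p with
  | nil => simp [pvChange]
  | cons y t' ih =>
    rcases List.pairwise_cons.mp h with ⟨hp, h2⟩
    have ihy := ih y h2
    simp only [pvChange]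
    by_cases hpy : y = p
    · subst hpy
      simp only [ne_eq, not_true_eq_false, if_false, List.toFinset_cons]
      rw [Finset.insert_idem] at *
      simpa using ihy
    · have hnot : p ∉ (y :: t').toFinset := by
        simp only [List.mem_toFinset, List.mem_cons]
        rintro (rfl | hmem)
        · exact hpy rfl
        · have h1 : p ≤ y := hp y (by simp)
          have h2' : y ≤ p := (List.pairwise_cons.mp h2).1 p hmem
          exact hpy (le_antisymm h1 h2').symm
      have : ((p :: y :: t').toFinset.card) = (y :: t').toFinset.card + 1 := by
        simp only [List.toFinset_cons (a := p)]
        rw [Finset.card_insert_of_notMem hnot]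
      rw [this]
      simp only [ne_eq, hpy, not_false_eq_true, if_true]
      push_cast
      omega

-- B's scan over the sorted list computes the number of distinct elements
lemma pvB_distinct (nums : List Int) :
    ((PySem.List.sorted nums (fun x => x) false).foldl
      (fun (st : Int × Option Int) x =>
        (if st.2 = none ∨ some x ≠ st.2 then st.1 + 1 else st.1, some x)) (0, none)).1
    = (nums.toFinset.card : Int) := by
  have hperm := PySem.List.sorted_perm nums (fun x => x) false
  have hfin : (PySem.List.sorted nums (fun x => x) false).toFinset = nums.toFinset :=
    List.toFinset_eq_of_perm _ _ hperm
  have hpw : (PySem.List.sorted nums (fun x => x) false).Pairwise (· ≤ ·) := by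
    simpa using PySem.List.sorted_pairwise nums (fun x => x)
  rcases hs : PySem.List.sorted nums (fun x => x) false with _ | ⟨p, t⟩
  · have : nums.toFinset = ∅ := by rw [← hfin, hs]; simp
    simp [this]
  · rw [hs] at hfin hpw
    simp only [List.foldl_cons]
    have h1 : (if True ∨ some p ≠ none then (0:Int) + 1 else 0) = 1 := by simp
    rw [show ((if True ∨ some p ≠ (none : Option Int) then (0:Int) + 1 else 0, some p)) = ((1:Int), some p) by simp, pvFold_some]
    have := pvChange_card p t hpw
    rw [← hfin]
    simp only []
    omega

-- A's dict length is the number of distinct elements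
lemma pvA_size (nums : List Int) :
    ((nums.foldl (fun (d : PySem.Dict Int Int) n => d.modify n 0 (· + 1)) PySem.Dict.empty).size)
    = nums.toFinset.card := by
  have hc : nums.foldl (fun (d : PySem.Dict Int Int) n => d.modify n 0 (· + 1)) PySem.Dict.empty
      = PySem.Dict.counter nums := (PySem.Dict.counter_eq_foldl nums).symm
  rw [hc]
  have hk : (PySem.Dict.counter nums : PySem.Dict Int Int).keys = PySem.Set.ofList nums :=
    PySem.Dict.keys_counter nums
  have hsize : (PySem.Dict.counter nums : PySem.Dict Int Int).size
      = (PySem.Dict.counter nums : PySem.Dict Int Int).keys.length := by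
    simp [PySem.Dict.size, PySem.Dict.keys]
  rw [hsize, hk]
  have hnd : (PySem.Set.ofList nums).Nodup := PySem.Set.nodup_ofList nums
  have hmem : ∀ x, x ∈ PySem.Set.ofList nums ↔ x ∈ nums := fun x => PySem.Set.mem_ofList nums x
  have : (PySem.Set.ofList nums).toFinset = nums.toFinset := by
    ext x; simp [hmem x]
  rw [← this, List.toFinset_card_of_nodup hnd]

-- ===== VERDICT (by name: the statement is the Claim_ definition above) =====
theorem solution_spec : Claim_equal_solution := by
  intro nums _
  unfold Spec_solution solution solution_alt
  simp only []
  rw [pvB_distinct nums]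
  rw [pvA_size nums]
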